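-- pv_equiv track=rewrite | github.com/kaandrmz/patch_level_dp | src/patch_level_dp/privacy/calculations.py | generate_crescent_pixels
-- ===== SOURCE A (Python) =====
-- from typing import Tuple, List, Union
--
-- def generate_crescent_pixels(size: int) -> List[Tuple[int, int]]:
--     """Generate pixel coordinates for a crescent/blob shape.
--
--     Creates a crescent by taking a circle and subtracting a smaller offset circle.
--     The result has approximately size^2 pixels.
--
--     Args:
--         size: Size parameter that determines the scale of the crescent
--
--     Returns:
--         List of (x, y) pixel coordinates forming the crescent
--     """
--     # Create a crescent with approximately size^2 pixels
--     # Use a larger circle with a cut-out offset circle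
--     # For size=10, we want ~100 pixels
--
--     # Main circle radius to get approximately size^2 pixels in the crescent
--     # A full circle of radius r has π*r^2 pixels, crescent has roughly half
--     # So we want 2*size^2/π ≈ 0.64*size^2, meaning r ≈ size*sqrt(2/π) ≈ 0.8*size
--     main_radius = int(size * 0.9)
--
--     # Offset and radius for the cut-out circle
--     cutout_radius = int(main_radius * 0.6)
--     offset_x = int(main_radius * 0.4)  # Shift cutout circle to create crescent
--     offset_y = 0
--
--     pixels = []
--     box_size = 2 * main_radius + 1
--     center = main_radius
--
--     for x in range(box_size):
--         for y in range(box_size):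
--             # Check if pixel is in main circle
--             dist_main = (x - center) ** 2 + (y - center) ** 2
--             in_main_circle = dist_main <= main_radius ** 2
--
--             # Check if pixel is in cutout circle (offset from center)
--             dist_cutout = (x - center - offset_x) ** 2 + (y - center - offset_y) ** 2
--             in_cutout_circle = dist_cutout <= cutout_radius ** 2
--
--             # Pixel is in crescent if it's in main circle but not in cutout
--             if in_main_circle and not in_cutout_circle:
--                 pixels.append((x, y))
--
--     return pixels
-- ===== SOURCE B (Python) =====
-- def generate_crescent_pixels(size):
--     """Crescent pixels = (points of the main circle) minus (points of the offset
--     cutout circle), computed as an explicit set difference row by row."""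
--     main_radius = int(size * 0.9)
--     cutout_radius = int(main_radius * 0.6)
--     offset_x = int(main_radius * 0.4)
--     center = main_radius
--     box = range(2 * main_radius + 1)
--     r2 = main_radius ** 2
--     c2 = cutout_radius ** 2
--     pixels = []
--     for x in box:
--         main_ys = {y for y in box if (x - center) ** 2 + (y - center) ** 2 <= r2}
--         cutout_ys = {y for y in box if (x - center - offset_x) ** 2 + (y - center) ** 2 <= c2}
--         pixels.extend((x, y) for y in sorted(main_ys - cutout_ys))
--     return pixels
-- ===== Notes on version B (the rewrite author's own statement) =====
-- stated objective: alternative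
-- what changed: Instead of A's single fused nested loop testing 'in main circle and not in cutout circle' per pixel, B populates, per row, the set of main-circle y's and the set of cutout-circle y's and emits the sorted set difference.
import Mathlib
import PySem

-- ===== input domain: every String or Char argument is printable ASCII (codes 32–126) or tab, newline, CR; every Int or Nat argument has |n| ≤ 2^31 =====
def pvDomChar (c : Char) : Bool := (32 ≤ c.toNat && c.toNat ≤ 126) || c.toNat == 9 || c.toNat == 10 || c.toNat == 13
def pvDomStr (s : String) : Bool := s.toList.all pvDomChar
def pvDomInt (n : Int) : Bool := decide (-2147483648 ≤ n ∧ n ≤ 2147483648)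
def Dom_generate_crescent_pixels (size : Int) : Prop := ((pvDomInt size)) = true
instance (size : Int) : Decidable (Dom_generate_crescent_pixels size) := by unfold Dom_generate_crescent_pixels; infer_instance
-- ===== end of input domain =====

-- B rebuilds the crescent row by row as an explicit set difference (main-circle ys minus
-- cutout-circle ys, sorted) instead of A's fused per-pixel membership test; objective: alternative.

-- ===== PORT A =====
-- int(size*0.9), int(r*0.6), int(r*0.4) are ported as the exact truncating integer divisions
-- (9*size)/10, (3*r)/5, (2*r)/5: for |size| ≤ 2^31 the double-precision products differ from the
-- exact rationals by far less than the distance to the nearest wrong integer, so int() truncation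
-- agrees with Int.tdiv (checked against CPython across the domain, incl. multiples of 10/5 and ±2^31).
def generate_crescent_pixels (size : Int) : List (Int × Int) :=
  let main_radius : Int := Int.tdiv (9 * size) 10
  let cutout_radius : Int := Int.tdiv (3 * main_radius) 5
  let offset_x : Int := Int.tdiv (2 * main_radius) 5
  let offset_y : Int := 0
  let box_size : Int := 2 * main_radius + 1
  let center : Int := main_radius
  (PySem.List.pyRange 0 box_size).foldl (fun pixels x =>
    (PySem.List.pyRange 0 box_size).foldl (fun pixels y =>
      let dist_main := (x - center) ^ 2 + (y - center) ^ 2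
      let in_main_circle : Bool := decide (dist_main ≤ main_radius ^ 2)
      let dist_cutout := (x - center - offset_x) ^ 2 + (y - center - offset_y) ^ 2
      let in_cutout_circle : Bool := decide (dist_cutout ≤ cutout_radius ^ 2)
      if in_main_circle && !in_cutout_circle then pixels ++ [(x, y)] else pixels) pixels) []

-- ===== PORT B =====
-- same exact integer renderings of int(size*0.9) / int(r*0.6) / int(r*0.4) as in port A (see comment there)
def generate_crescent_pixels_alt (size : Int) : List (Int × Int) :=
  let main_radius : Int := Int.tdiv (9 * size) 10
  let cutout_radius : Int := Int.tdiv (3 * main_radius) 5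
  let offset_x : Int := Int.tdiv (2 * main_radius) 5
  let center : Int := main_radius
  let box := PySem.List.pyRange 0 (2 * main_radius + 1)
  let r2 := main_radius ^ 2
  let c2 := cutout_radius ^ 2
  box.foldl (fun pixels x =>
    let main_ys : PySem.Set Int :=
      PySem.Set.ofList (box.filter (fun y => decide ((x - center) ^ 2 + (y - center) ^ 2 ≤ r2)))
    let cutout_ys : PySem.Set Int :=
      PySem.Set.ofList (box.filter (fun y => decide ((x - center - offset_x) ^ 2 + (y - center) ^ 2 ≤ c2)))
    pixels ++ (PySem.List.sorted (PySem.Set.diff main_ys cutout_ys) (fun y => y)).map (fun y => (x, y))) []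

-- ===== PRECONDITION & SPEC =====
def Spec_generate_crescent_pixels (size : Int) (out : List (Int × Int)) : Prop := out = generate_crescent_pixels_alt size
instance (size : Int) (out : List (Int × Int)) : Decidable (Spec_generate_crescent_pixels size out) := by unfold Spec_generate_crescent_pixels; infer_instance

-- ===== CLAIM (what is proved, stated in full; the proofs are below) =====
def Claim_equal_generate_crescent_pixels : Prop := ∀ (size : Int), Dom_generate_crescent_pixels size → Spec_generate_crescent_pixels size (generate_crescent_pixels size)

-- ===== LEMMAS AND PROOFS =====

lemma pyRange_zero_pairwise_lt (b : Int) : (PySem.List.pyRange 0 b).Pairwise (· < ·) := by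
  rcases (by omega : b ≤ 0 ∨ 0 < b) with h | h
  · have hnil : PySem.List.pyRange 0 b = [] := by
      refine List.eq_nil_iff_forall_not_mem.mpr fun x hx => ?_
      rw [PySem.List.mem_pyRange_one] at hx; omega
    simp [hnil]
  · have hb : b = (b.toNat : Int) := by omega
    rw [hb, PySem.List.pyRange_zero_natCast]
    exact List.pairwise_lt_range.map _ (fun a b hab => by exact_mod_cast hab)

-- per-row agreement: B's sorted set difference of the two y-sets is exactly A's filtered row
lemma row_eq (b : Int) (pm pc : Int → Bool) (x : Int) :
    (PySem.List.sorted
        (PySem.Set.diff (PySem.Set.ofList ((PySem.List.pyRange 0 b).filter pm))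
          (PySem.Set.ofList ((PySem.List.pyRange 0 b).filter pc))) (fun y => y)).map (fun y => (x, y))
      = ((PySem.List.pyRange 0 b).filter (fun y => pm y && !pc y)).map (fun y => (x, y)) := by
  have hyr := pyRange_zero_pairwise_lt b
  have hm : ((PySem.List.pyRange 0 b).filter pm).Nodup :=
    (List.Pairwise.sublist List.filter_sublist hyr).imp fun hab => ne_of_lt hab
  rw [PySem.Set.ofList_eq_self_of_nodup _ hm]
  have hdiff : PySem.Set.diff ((PySem.List.pyRange 0 b).filter pm)
      (PySem.Set.ofList ((PySem.List.pyRange 0 b).filter pc))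
      = (PySem.List.pyRange 0 b).filter (fun y => pm y && !pc y) := by
    simp only [PySem.Set.diff, List.filter_filter]
    refine List.filter_congr fun y hy => ?_
    simp [PySem.Set.contains, List.contains_eq_mem, PySem.Set.mem_ofList, List.mem_filter, hy,
      Bool.and_comm]
  rw [hdiff]
  rw [PySem.List.sorted_eq_self_of_pairwise _ _
    ((List.Pairwise.sublist List.filter_sublist hyr).imp fun hab => le_of_lt hab)]

lemma flatMap_ext {α β : Type} (l : List α) (f g : α → List β) (h : ∀ a, f a = g a) :
    l.flatMap f = l.flatMap g := by
  induction l with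
  | nil => rfl
  | cons a t ih => simp [List.flatMap_cons, h a, ih]

-- ===== VERDICT (by name: the statement is the Claim_ definition above) =====
theorem generate_crescent_pixels_spec : Claim_equal_generate_crescent_pixels := by
  intro size _
  unfold Spec_generate_crescent_pixels generate_crescent_pixels generate_crescent_pixels_alt
  simp only [sub_zero, PySem.List.foldl_append_if, PySem.List.foldl_append_eq_flatMap,
    List.nil_append]
  exact (flatMap_ext _ _ _ (fun x => row_eq _ _ _ x)).symm
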